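-- pv_equiv track=rewrite | github.com/nttmkhang/FlowChartPython | 158B/_158B.py | DemLonNhat
-- ===== SOURCE A (Python) =====
-- def DemLonNhat(n):
-- 	lc = n % 10
-- 	dem = 0
-- 	t = n
-- 	while (t != 0):
-- 		dv = t % 10
-- 		if(dv > lc):
-- 			lc = dv
-- 		t = int(t / 10)
-- 	t = n
-- 	while (t != 0):
-- 		dv = t % 10
-- 		if( dv == lc):
-- 			 dem = dem + 1
-- 		t = int(t / 10)
-- 	return dem
-- ===== SOURCE B (Python) =====
-- def DemLonNhat(n):
--     counts = {}
--     t = n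
--     while t != 0:
--         dv = t % 10
--         counts[dv] = counts.get(dv, 0) + 1
--         t = int(t / 10)
--     return counts[max(counts)] if counts else 0
-- ===== Notes on version B (the rewrite author's own statement) =====
-- stated objective: simpler
-- what changed: A scans the digit sequence twice (one while-loop to find the maximum digit, a second to count it); B makes a single pass building a digit-frequency dict and then returns the count stored under the largest key.
import Mathlib
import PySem

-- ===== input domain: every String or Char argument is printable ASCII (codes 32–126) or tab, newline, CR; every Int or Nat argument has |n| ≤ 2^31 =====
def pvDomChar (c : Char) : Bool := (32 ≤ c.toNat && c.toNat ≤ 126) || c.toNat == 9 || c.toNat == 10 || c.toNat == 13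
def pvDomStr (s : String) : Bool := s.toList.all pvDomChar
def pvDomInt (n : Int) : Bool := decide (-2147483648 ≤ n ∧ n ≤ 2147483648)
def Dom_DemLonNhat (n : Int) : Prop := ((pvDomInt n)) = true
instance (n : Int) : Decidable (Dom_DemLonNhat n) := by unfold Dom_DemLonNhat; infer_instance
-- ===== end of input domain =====

-- B replaces A's two digit-extraction loops (find the max digit, then count it) by one loop
-- that builds a digit-frequency dict, then looks up the count of the largest key (objective: simpler).

-- termination helper cited by the ports' recursions
theorem pvTdivTenLt (t : Int) (h : t ≠ 0) : (t.tdiv 10).natAbs < t.natAbs := by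
  rw [Int.natAbs_tdiv]
  exact Nat.div_lt_self (Int.natAbs_pos.mpr h) (by norm_num)

-- ===== PORT A =====
-- Python's 'int(t / 10)' truncates toward zero, which is Int.tdiv t 10; on the |n| ≤ 2^31 domain
-- the float division is exact enough that int(t/10) = t-truncating-division-by-10, so this port is exact there.
def DemLonNhatMaxLoop (t lc : Int) : Int :=
  if h : t = 0 then lc
  else DemLonNhatMaxLoop (t.tdiv 10)
    (if PySem.Int.mod t 10 > lc then PySem.Int.mod t 10 else lc)
termination_by t.natAbs
decreasing_by exact pvTdivTenLt t h

def DemLonNhatCountLoop (t lc dem : Int) : Int :=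
  if h : t = 0 then dem
  else DemLonNhatCountLoop (t.tdiv 10) lc
    (if PySem.Int.mod t 10 = lc then dem + 1 else dem)
termination_by t.natAbs
decreasing_by exact pvTdivTenLt t h

def DemLonNhat (n : Int) : Int :=
  DemLonNhatCountLoop n (DemLonNhatMaxLoop n (PySem.Int.mod n 10)) 0

-- ===== PORT B =====
def DemLonNhatAltLoop (t : Int) (counts : PySem.Dict Int Int) : PySem.Dict Int Int :=
  if h : t = 0 then counts
  else DemLonNhatAltLoop (t.tdiv 10)
    (counts.insert (PySem.Int.mod t 10) (counts.getD (PySem.Int.mod t 10) 0 + 1))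
termination_by t.natAbs
decreasing_by exact pvTdivTenLt t h

-- 'counts[max(counts)] if counts else 0': max? over the keys is none exactly when counts is empty
def DemLonNhat_alt (n : Int) : Int :=
  let counts := DemLonNhatAltLoop n PySem.Dict.empty
  match PySem.List.max? counts.keys (fun k => k) with
  | some k => counts.getD k 0
  | none => 0

-- ===== PRECONDITION & SPEC =====
def Spec_DemLonNhat (n : Int) (out : Int) : Prop := out = DemLonNhat_alt n
instance (n : Int) (out : Int) : Decidable (Spec_DemLonNhat n out) := by unfold Spec_DemLonNhat; infer_instance

-- ===== CLAIM (what is proved, stated in full; the proofs are below) =====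
def Claim_equal_DemLonNhat : Prop := ∀ (n : Int), Dom_DemLonNhat n → Spec_DemLonNhat n (DemLonNhat n)

-- ===== LEMMAS AND PROOFS =====

-- the digit sequence both loops traverse
def pvDigits (t : Int) : List Int :=
  if h : t = 0 then []
  else PySem.Int.mod t 10 :: pvDigits (t.tdiv 10)
termination_by t.natAbs
decreasing_by exact pvTdivTenLt t h

theorem maxLoop_eq_foldl (t lc : Int) :
    DemLonNhatMaxLoop t lc = (pvDigits t).foldl max lc := by
  fun_induction DemLonNhatMaxLoop t lc with
  | case1 lc => simp [pvDigits]
  | case2 t lc h ih =>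
      rw [pvDigits]; simp only [h, dite_false, List.foldl_cons]
      refine ih.trans ?_
      congr 1
      rw [max_def]; split_ifs <;> omega

theorem countLoop_eq_count (t lc dem : Int) :
    DemLonNhatCountLoop t lc dem = dem + ((pvDigits t).count lc : Int) := by
  fun_induction DemLonNhatCountLoop t lc dem with
  | case1 dem => simp [pvDigits]
  | case2 t dem h ih =>
      rw [pvDigits]; simp only [h, dite_false, List.count_cons, beq_iff_eq]
      refine ih.trans ?_
      split_ifs <;> push_cast <;> omega

theorem altLoop_eq_foldl (t : Int) (d : PySem.Dict Int Int) :
    DemLonNhatAltLoop t d =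
      (pvDigits t).foldl (fun d x => d.insert x (d.getD x 0 + 1)) d := by
  fun_induction DemLonNhatAltLoop t d with
  | case1 d => simp [pvDigits]
  | case2 t d h ih =>
      rw [pvDigits]; simp only [h, dite_false, List.foldl_cons]
      exact ih

theorem foldl_max_mem (l : List Int) (a : Int) : l.foldl max a = a ∨ l.foldl max a ∈ l := by
  induction l generalizing a with
  | nil => simp
  | cons b t ih =>
      rcases ih (max a b) with h | h
      · rcases max_cases a b with ⟨he, _⟩ | ⟨he, _⟩
        · left; simp only [List.foldl_cons]; rw [h, he]
        · right; simp only [List.foldl_cons]; rw [h, he]; exact List.mem_cons_self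
      · right; exact List.mem_cons_of_mem b h

theorem DemLonNhat_spec : Claim_equal_DemLonNhat := by
  unfold Claim_equal_DemLonNhat
  intro n _
  unfold Spec_DemLonNhat
  by_cases hn : n = 0
  · subst hn
    simp [DemLonNhat, DemLonNhat_alt, DemLonNhatMaxLoop, DemLonNhatCountLoop,
          DemLonNhatAltLoop, PySem.List.max?, PySem.Dict.empty, PySem.Dict.keys]
  · show DemLonNhat n = DemLonNhat_alt n
    rw [DemLonNhat, DemLonNhat_alt]
    rw [countLoop_eq_count, maxLoop_eq_foldl, altLoop_eq_foldl,
        PySem.Dict.foldl_insert_getD_add_one_eq_counter, PySem.Dict.keys_counter]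
    have hL : pvDigits n = PySem.Int.mod n 10 :: pvDigits (n.tdiv 10) := by
      rw [pvDigits]; simp [hn]
    set d0 := PySem.Int.mod n 10 with hd0def
    set rest := pvDigits (n.tdiv 10) with hrestdef
    have hM : (pvDigits n).foldl max d0 = rest.foldl max d0 := by
      rw [hL]; simp
    set M := rest.foldl max d0 with hMdef
    have hMmemL : M ∈ pvDigits n := by
      rw [hL]
      rcases foldl_max_mem rest d0 with h | h
      · rw [hMdef, h]; exact List.mem_cons_self
      · exact List.mem_cons_of_mem _ (hMdef ▸ h)
    obtain ⟨m, hm⟩ : ∃ m, PySem.List.max? (PySem.Set.ofList (pvDigits n)) (fun k => k) = some m := by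
      cases hmx : PySem.List.max? (PySem.Set.ofList (pvDigits n)) (fun k => k) with
      | none =>
          exfalso
          have hnil := (PySem.List.max?_eq_none_iff _ _).mp hmx
          have hd0 : d0 ∈ PySem.Set.ofList (pvDigits n) :=
            (PySem.Set.mem_ofList _ _).mpr (by rw [hL]; exact List.mem_cons_self)
          rw [hnil] at hd0; cases hd0
      | some m => exact ⟨m, rfl⟩
    have hmL : m ∈ pvDigits n := (PySem.Set.mem_ofList _ _).mp (PySem.List.max?_mem hm)
    have hMle : M ≤ m := PySem.List.max?_isMax hm M ((PySem.Set.mem_ofList _ _).mpr hMmemL)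
    have hmle : m ≤ M := by
      rw [hL] at hmL
      rcases List.mem_cons.mp hmL with h | h
      · rw [h, hMdef]; exact (PySem.List.le_foldl_max rest d0).1
      · rw [hMdef]; exact (PySem.List.le_foldl_max rest d0).2 m h
    have hmM : m = M := le_antisymm hmle hMle
    rw [hm, hM]
    simp only [PySem.Dict.getD_counter, hmM]
    omega
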